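-- pv_equiv track=rewrite | github.com/WorryingWonton/PyBats | string_3.py | mirrorEnds
-- ===== SOURCE A (Python) =====
-- def mirrorEnds(my_string):
--     mir_str = ''
--     for idx in range(len(my_string)):
--         if my_string[idx] == my_string[-idx - 1]:
--             mir_str += my_string[idx]
--         else:
--             break
--     return mir_str
-- ===== SOURCE B (Python) =====
-- def mirrorEnds(my_string):
--     rev = my_string[::-1]
--     lo, hi = 0, len(my_string)
--     while lo < hi:
--         mid = (lo + hi + 1) // 2
--         if my_string[:mid] == rev[:mid]:
--             lo = mid
--         else:
--             hi = mid - 1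
--     return my_string[:lo]
-- ===== Notes on version B (the rewrite author's own statement) =====
-- stated objective: alternative
-- what changed: Replaces A's linear accumulate-and-break index loop with a binary search over prefix lengths for the longest k with my_string[:k] == my_string[::-1][:k], returning my_string[:k]; correct because prefix-of-string-equals-prefix-of-reversal is monotone in k.
import Mathlib
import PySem

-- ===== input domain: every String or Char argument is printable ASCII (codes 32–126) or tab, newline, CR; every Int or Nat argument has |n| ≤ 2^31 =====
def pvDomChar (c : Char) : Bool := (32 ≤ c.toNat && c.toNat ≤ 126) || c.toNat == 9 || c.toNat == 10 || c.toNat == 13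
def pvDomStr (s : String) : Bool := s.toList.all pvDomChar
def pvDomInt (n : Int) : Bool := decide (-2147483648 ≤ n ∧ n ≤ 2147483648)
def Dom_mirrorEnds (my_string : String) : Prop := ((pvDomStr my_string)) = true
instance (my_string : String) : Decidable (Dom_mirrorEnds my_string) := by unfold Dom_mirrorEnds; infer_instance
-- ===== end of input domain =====

-- B replaces A's linear accumulate-and-break scan by a binary search for the longest k with
-- my_string[:k] == my_string[::-1][:k] (objective: alternative algorithm, not faster).

-- ===== PORT A =====
-- the 'for idx in range(len(my_string)): … else: break' loop; the match's catch-all arm is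
-- Python's IndexError (unreachable here, as idx and -idx-1 are always in range)
def mirrorEndsLoop (s : List Char) : List Int → List Char → List Char
  | [], acc => acc
  | idx :: rest, acc =>
    match PySem.List.pyGet? s idx, PySem.List.pyGet? s (-idx - 1) with
    | some a, some b => if a == b then mirrorEndsLoop s rest (acc ++ [a]) else acc
    | _, _ => acc

def mirrorEnds (my_string : String) : String :=
  String.ofList
    (mirrorEndsLoop my_string.toList (PySem.List.pyRange 0 (PySem.Str.len my_string) 1) [])

-- ===== PORT B =====
-- termination fact for the while-loop: lo < hi → lo + 1 ≤ (lo+hi+1)//2 ∧ (lo+hi+1)//2 ≤ hi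
theorem bmid_bounds (lo hi : Int) (h : lo < hi) :
    lo + 1 ≤ PySem.Int.floordiv (lo + hi + 1) 2 ∧ PySem.Int.floordiv (lo + hi + 1) 2 ≤ hi := by
  have := PySem.Int.floordiv_two_mid_bounds (lo := lo + 1) (hi := hi) (by omega)
  constructor <;> [skip; skip] <;> (have h2 := this; rw [show lo + hi + 1 = lo + 1 + hi by ring]; omega)

-- the 'while lo < hi' binary-search loop of Source B
def bsearchB (s rev : List Char) (lo hi : Int) : Int :=
  if h : lo < hi then
    let mid := PySem.Int.floordiv (lo + hi + 1) 2
    if PySem.List.slice s none (some mid) == PySem.List.slice rev none (some mid) then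
      bsearchB s rev mid hi
    else
      bsearchB s rev lo (mid - 1)
  else lo
termination_by (hi - lo).toNat
decreasing_by
  · have := bmid_bounds lo hi h; omega
  · have := bmid_bounds lo hi h; omega

def mirrorEnds_alt (my_string : String) : String :=
  -- rev = my_string[::-1]  (s[::-1] is reversal: PySem.Str.slice?_none_none_neg_one)
  let s := my_string.toList
  let rev := s.reverse
  let lo := bsearchB s rev 0 (PySem.Str.len my_string)
  -- return my_string[:lo]
  String.ofList (PySem.List.slice s none (some lo))

-- ===== PRECONDITION & SPEC =====
def Spec_mirrorEnds (my_string : String) (out : String) : Prop := out = mirrorEnds_alt my_string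
instance (my_string : String) (out : String) : Decidable (Spec_mirrorEnds my_string out) := by unfold Spec_mirrorEnds; infer_instance

-- ===== CLAIM (what is proved, stated in full; the proofs are below) =====
def Claim_equal_mirrorEnds : Prop := ∀ (my_string : String), Dom_mirrorEnds my_string → Spec_mirrorEnds my_string (mirrorEnds my_string)

-- ===== LEMMAS AND PROOFS =====

-- longest common prefix of two character lists (proof-side characterisation of both programs)
def cpre : List Char → List Char → List Char
  | a :: as, b :: bs => if a = b then a :: cpre as bs else []
  | _, _ => []

theorem cpre_length_le_left : ∀ (u v : List Char), (cpre u v).length ≤ u.length := by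
  intro u
  induction u with
  | nil => intro v; cases v <;> simp [cpre]
  | cons a as ih =>
    intro v
    cases v with
    | nil => simp [cpre]
    | cons b bs =>
      by_cases hab : a = b <;> simp [cpre, hab]
      exact ih bs

theorem cpre_take_left : ∀ (u v : List Char), u.take (cpre u v).length = cpre u v := by
  intro u
  induction u with
  | nil => intro v; cases v <;> simp [cpre]
  | cons a as ih =>
    intro v
    cases v with
    | nil => simp [cpre]
    | cons b bs =>
      by_cases hab : a = b <;> simp [cpre, hab]
      exact ih bs

theorem take_eq_iff_le_cpre :
    ∀ (u v : List Char) (k : Nat), k ≤ u.length → k ≤ v.length →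
      (u.take k = v.take k ↔ k ≤ (cpre u v).length) := by
  intro u
  induction u with
  | nil =>
    intro v k hk _
    have hk0 : k = 0 := by simpa using hk
    subst hk0; simp
  | cons a as ih =>
    intro v k hku hkv
    cases v with
    | nil => simp at hkv; subst hkv; simp
    | cons b bs =>
      cases k with
      | zero => simp
      | succ k' =>
        by_cases hab : a = b
        · subst hab
          rw [show cpre (a :: as) (a :: bs) = a :: cpre as bs from by simp [cpre]]
          simp only [List.take_succ_cons, List.length_cons, List.cons.injEq, true_and,
            Nat.add_le_add_iff_right]
          exact ih bs k' (by simpa using hku) (by simpa using hkv)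
        · simp [cpre, hab]

-- the A-loop from index j accumulates the common prefix of the j-suffixes of s and s.reverse
theorem mirrorEndsLoop_eq (s : List Char) :
    ∀ (m j : Nat) (acc : List Char), s.length - j ≤ m → j ≤ s.length →
      mirrorEndsLoop s (PySem.List.pyRange (j : Int) (s.length : Int) 1) acc
        = acc ++ cpre (s.drop j) (s.reverse.drop j) := by
  intro m
  induction m with
  | zero =>
    intro j acc hm hj
    have hje : j = s.length := by omega
    subst hje
    rw [PySem.List.pyRange_one_eq_nil (by omega)]
    simp [mirrorEndsLoop, cpre]
  | succ m ih =>
    intro j acc hm hj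
    rcases Nat.lt_or_ge j s.length with hjlt | hge
    · rw [PySem.List.pyRange_one_cons (by exact_mod_cast hjlt)]
      have hgj : PySem.List.pyGet? s (j : Int) = some (s[j]'hjlt) := by
        simp [PySem.List.pyGet?_natCast, List.getElem?_eq_getElem hjlt]
      have hneg : PySem.List.pyGet? s (-(j : Int) - 1) = some (s[s.length - 1 - j]'(by omega)) := by
        have h1 : (-(j : Int) - 1) = -((j + 1 : Nat) : Int) := by push_cast; ring
        rw [h1, PySem.List.pyGet?_neg_natCast s (j + 1) (by omega) (by omega)]
        have h2 : s.length - (j + 1) = s.length - 1 - j := by omega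
        rw [h2, List.getElem?_eq_getElem (by omega)]
      have hrev : s.reverse[j]'(by simpa) = s[s.length - 1 - j]'(by omega) :=
        List.getElem_reverse ..
      have hds : s.drop j = s[j]'hjlt :: s.drop (j + 1) := (List.getElem_cons_drop ..).symm
      have hdr : s.reverse.drop j = s.reverse[j]'(by simpa) :: s.reverse.drop (j + 1) :=
        (List.getElem_cons_drop ..).symm
      show mirrorEndsLoop s ((j:Int) :: PySem.List.pyRange ((j:Int)+1) (s.length : Int) 1) acc = _
      rw [mirrorEndsLoop, hgj, hneg]
      dsimp only
      by_cases heq : s[j]'hjlt = s[s.length - 1 - j]'(by omega)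
      · rw [if_pos (by exact beq_iff_eq.mpr heq)]
        have hcast : ((j : Int) + 1) = ((j + 1 : Nat) : Int) := by push_cast; ring
        rw [hcast, ih (j+1) (acc ++ [s[j]'hjlt]) (by omega) (by omega)]
        rw [hds, hdr, hrev]
        simp [cpre, heq]
      · rw [if_neg (by simpa using heq)]
        rw [hds, hdr, hrev]
        simp [cpre, heq]
    · have hje : j = s.length := by omega
      subst hje
      rw [PySem.List.pyRange_one_eq_nil (by omega)]
      simp [mirrorEndsLoop, cpre]

theorem bsearchB_eq (u v : List Char) (hlen : v.length = u.length) :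
    ∀ (m : Nat) (lo hi : Int), (hi - lo).toNat ≤ m → 0 ≤ lo →
      lo ≤ ((cpre u v).length : Int) → ((cpre u v).length : Int) ≤ hi → hi ≤ (u.length : Int) →
      bsearchB u v lo hi = ((cpre u v).length : Int) := by
  intro m
  induction m with
  | zero =>
    intro lo hi hm h0 hlo hhi hn
    rw [bsearchB, dif_neg (by omega)]
    omega
  | succ m ih =>
    intro lo hi hm h0 hlo hhi hn
    rw [bsearchB]
    by_cases h : lo < hi
    · rw [dif_pos h]
      have hmid := bmid_bounds lo hi h
      set mid := PySem.Int.floordiv (lo + hi + 1) 2 with hmiddef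
      have hm0 : 0 ≤ mid := by omega
      have hsl : PySem.List.slice u none (some mid) = u.take mid.toNat :=
        PySem.List.slice_to u hm0
      have hsr : PySem.List.slice v none (some mid) = v.take mid.toNat :=
        PySem.List.slice_to v hm0
      have hchar := take_eq_iff_le_cpre u v mid.toNat (by omega) (by omega)
      by_cases heq : u.take mid.toNat = v.take mid.toNat
      · rw [if_pos (by rw [hsl, hsr]; exact beq_iff_eq.mpr heq)]
        have : mid.toNat ≤ (cpre u v).length := hchar.mp heq
        exact ih mid hi (by omega) (by omega) (by omega) hhi hn
      · rw [if_neg (by rw [hsl, hsr]; simpa using heq)]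
        have : ¬ mid.toNat ≤ (cpre u v).length := fun hc => heq (hchar.mpr hc)
        exact ih lo (mid - 1) (by omega) h0 hlo (by omega) (by omega)
    · rw [dif_neg h]
      omega

-- ===== VERDICT (by name: the statement is the Claim_ definition above) =====
theorem mirrorEnds_spec : Claim_equal_mirrorEnds := by
  intro s _
  unfold Spec_mirrorEnds mirrorEnds mirrorEnds_alt
  dsimp only
  have hA := mirrorEndsLoop_eq s.toList s.toList.length 0 [] (by omega) (by omega)
  simp only [Nat.cast_zero] at hA
  have hlen : PySem.Str.len s = (s.toList.length : Int) := by simp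
  have hL : (cpre s.toList s.toList.reverse).length ≤ s.toList.length :=
    cpre_length_le_left ..
  have hB := bsearchB_eq s.toList s.toList.reverse (by simp)
      (s.toList.length) 0 (s.toList.length : Int) (by omega) (by omega)
      (by exact_mod_cast Nat.zero_le _) (by exact_mod_cast hL) (by omega)
  rw [hlen, hA, hB, PySem.List.slice_to _ (by positivity)]
  simp [cpre_take_left]
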